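-- pv_equiv track=rewrite | github.com/Kesendo/R-equals-C-Psi-squared | simulations/_a3_u0_v0_degeneracy_finding.py | bond_flip_targets
-- ===== SOURCE A (Python) =====
-- def bond_flip_targets(state, N):
--     out = []
--     for b in range(N - 1):
--         bit_hi = (state >> (N - 1 - b)) & 1
--         bit_lo = (state >> (N - 2 - b)) & 1
--         if bit_hi != bit_lo:
--             mask = (1 << (N - 1 - b)) | (1 << (N - 2 - b))
--             out.append((b, state ^ mask))
--     return out
-- ===== SOURCE B (Python) =====
-- def bond_flip_targets(state, N):
--     if N < 2:
--         return []
--     # Each set bit q of diff marks a domain wall between bit positions q and q+1.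
--     diff = (state ^ (state >> 1)) & ((1 << (N - 1)) - 1)
--     out = []
--     while diff:
--         q = diff.bit_length() - 1      # highest remaining wall -> smallest bond index
--         diff ^= 1 << q
--         out.append((N - 2 - q, state ^ (3 << q)))
--     return out
-- ===== Notes on version B (the rewrite author's own statement) =====
-- stated objective: faster
-- what changed: Instead of scanning every bond with two shifts and a comparison, B computes the XOR-difference word diff = (state ^ (state >> 1)) masked to the low N-1 bits once, then walks only its set bits from highest to lowest via bit_length, emitting (N-2-q, state ^ (3<<q)) per domain wall.
import Mathlib
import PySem

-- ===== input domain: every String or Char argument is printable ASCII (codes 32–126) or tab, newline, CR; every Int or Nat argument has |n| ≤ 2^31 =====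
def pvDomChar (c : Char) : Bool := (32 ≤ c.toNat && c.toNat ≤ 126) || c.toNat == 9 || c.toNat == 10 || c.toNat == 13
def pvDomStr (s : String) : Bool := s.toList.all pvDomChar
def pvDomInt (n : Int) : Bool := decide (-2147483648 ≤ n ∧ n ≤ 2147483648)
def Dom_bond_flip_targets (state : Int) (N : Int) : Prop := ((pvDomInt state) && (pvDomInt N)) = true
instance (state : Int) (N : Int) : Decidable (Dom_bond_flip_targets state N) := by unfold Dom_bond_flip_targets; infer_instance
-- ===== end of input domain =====

-- B replaces A's per-bond two-shift scan by one XOR-difference word whose set bits (the domain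
-- walls) are walked from highest to lowest (objective: alternative algorithm, same output).

-- ===== PORT A =====
def bond_flip_targets (state : Int) (N : Int) : List (Int × Int) :=
  (PySem.List.pyRange 0 (N - 1)).foldl
    (fun out b =>
      -- shift counts N-1-b and N-2-b are ≥ 0 for every b in range(N-1), so .toNat is exact here
      let bit_hi := PySem.Int.band (state >>> (N - 1 - b).toNat) 1
      let bit_lo := PySem.Int.band (state >>> (N - 2 - b).toNat) 1
      if bit_hi ≠ bit_lo then
        let mask := PySem.Int.bor ((1 : Int) <<< (N - 1 - b).toNat) ((1 : Int) <<< (N - 2 - b).toNat)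
        out ++ [(b, PySem.Int.bxor state mask)]
      else out) []

-- ===== PORT B =====
-- a fact the walk's termination proof needs
theorem tb_of_bracket (d q : Nat) (h1 : 2^q ≤ d) (h2 : d < 2^(q+1)) : d.testBit q = true := by
  rw [Nat.testBit_eq_decide_div_mod_eq]
  have hp : 0 < 2^q := Nat.two_pow_pos q
  have hlo : 1 ≤ d / 2^q := (Nat.le_div_iff_mul_le hp).mpr (by omega)
  have hhi : d / 2^q < 2 := (Nat.div_lt_iff_lt_mul hp).mpr (by rw [pow_succ] at h2; omega)
  have : d / 2^q = 1 := by omega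
  simp [this]

-- termination of the walk (cited in decreasing_by): clearing the top set bit strictly decreases diff
theorem pvXorTopLt (d : Nat) (hd : ¬ d = 0) :
    d ^^^ (1 <<< (PySem.Int.bitLength (d : Int) - 1)) < d := by
  set L := PySem.Int.bitLength (d : Int) with hLdef
  have h1 : 2 ^ (L - 1) ≤ d := by
    have := PySem.Int.two_pow_bitLength_le (d : Int) (by exact_mod_cast hd)
    simpa using this
  have h2 : d < 2 ^ L := by
    have := PySem.Int.lt_two_pow_bitLength (d : Int)
    simpa using this
  have hL1 : 1 ≤ L := by
    by_contra h
    have : L = 0 := by omega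
    rw [this] at h2; simp at h2; omega
  set q := L - 1 with hq
  have h2' : d < 2 ^ (q + 1) := by have : q + 1 = L := by omega
                                   rw [this]; exact h2
  rw [Nat.one_shiftLeft]
  have hlt : d ^^^ 2 ^ q < 2 ^ q := by
    apply Nat.lt_pow_two_of_testBit
    intro i hi
    rcases Nat.eq_or_lt_of_le hi with he | hgt
    · rw [← he, Nat.testBit_xor, tb_of_bracket d q h1 h2', Nat.testBit_two_pow]
      simp
    · rw [Nat.testBit_xor, Nat.testBit_two_pow]
      have : d.testBit i = false := Nat.testBit_eq_false_of_lt (lt_of_lt_of_le h2' (Nat.pow_le_pow_right (by norm_num) hgt))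
      simp [this]; omega
  exact lt_of_lt_of_le hlt h1

-- the 'while diff:' loop of Source B; diff is nonnegative there, tracked as a Nat

-- the 'while diff:' loop of Source B; diff is nonnegative there, tracked as a Nat
def bftWalk (state : Int) (N : Int) (d : Nat) (out : List (Int × Int)) : List (Int × Int) :=
  if h : d = 0 then out
  else
    -- q = diff.bit_length() - 1, via PySem.Int.bitLength (exact); diff ^= 1 << q clears that bit
    let q := PySem.Int.bitLength (d : Int) - 1
    bftWalk state N (d ^^^ (1 <<< q)) (out ++ [(N - 2 - (q : Int), PySem.Int.bxor state ((3 : Int) <<< q))])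
  termination_by d
  decreasing_by exact pvXorTopLt d h

def bond_flip_targets_alt (state : Int) (N : Int) : List (Int × Int) :=
  if N < 2 then []
  else
    -- diff = (state ^ (state >> 1)) & ((1 << (N-1)) - 1); N-1 ≥ 1 here so .toNat is exact
    let diff := PySem.Int.band (PySem.Int.bxor state (state >>> 1)) (((1 : Int) <<< (N - 1).toNat) - 1)
    bftWalk state N diff.toNat []

-- ===== PRECONDITION & SPEC =====
def Spec_bond_flip_targets (state : Int) (N : Int) (out : List (Int × Int)) : Prop := out = bond_flip_targets_alt state N
instance (state : Int) (N : Int) (out : List (Int × Int)) : Decidable (Spec_bond_flip_targets state N out) := by unfold Spec_bond_flip_targets; infer_instance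

-- ===== CLAIM (what is proved, stated in full; the proofs are below) =====
def Claim_equal_bond_flip_targets : Prop := ∀ (state : Int) (N : Int), Dom_bond_flip_targets state N → Spec_bond_flip_targets state N (bond_flip_targets state N)

-- ===== LEMMAS AND PROOFS =====
theorem bxor_eq_xor (a b : Int) : PySem.Int.bxor a b = Int.xor a b := by
  unfold PySem.Int.bxor
  rcases a with m | m <;> rcases b with n | n <;>
    simp [Int.xor, Int.negSucc_eq, Int.toNat] <;> omega

theorem itb_shiftRight (x : Int) (k i : Nat) : (x >>> k).testBit i = x.testBit (k + i) := by
  rcases x with m | m <;>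
    simp only [HShiftRight.hShiftRight, ShiftRight.shiftRight, Int.shiftRight, Int.testBit] <;>
    rw [show ∀ a b : Nat, a.shiftRight b = a >>> b from fun _ _ => rfl, Nat.testBit_shiftRight]

theorem itb_shiftRight_one (x : Int) (i : Nat) : (x >>> (1:Int)).testBit i = x.testBit (1+i) := by
  rw [show ((1:Int)) = (((1:Nat)):Int) from rfl, Int.shiftRight_natCast_right, itb_shiftRight]

theorem compl_sub (n : Nat) : ∀ r, r < 2^n → (2^n - 1) - r = (2^n - 1) ^^^ r := by
  induction n with
  | zero => intro r hr; interval_cases r; rfl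
  | succ n ih =>
    intro r hr
    have hb := Nat.bit_bodd_div2 r
    have h1 : (2:Nat)^(n+1) - 1 = Nat.bit true (2^n - 1) := by
      simp [Nat.bit_val, pow_succ]; omega
    rw [← hb, h1, Nat.xor_bit, ← ih r.div2 (by rw [Nat.div2_val]; omega)]
    rcases hB : r.bodd <;>
      simp [Nat.bit_val, Nat.div2_val] <;>
      · have := Nat.bodd_add_div2 r
        rw [hB] at this
        have hp : 0 < (2:Nat)^n := Nat.two_pow_pos n
        simp at this; omega

theorem band_mask_testBit (x : Int) (n q : Nat) :
    ((PySem.Int.band x (((2^n : Nat) : Int) - 1)).toNat).testBit q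
      = (x.testBit q && decide (q < n)) := by
  have hcast : (((2^n : Nat) : Int) - 1) = ((2^n - 1 : Nat) : Int) := by
    have : 1 ≤ 2^n := Nat.one_le_two_pow
    push_cast [this]; ring
  rw [hcast]
  rcases x with m | m
  · rw [show ((Int.ofNat m) = ((m : Nat) : Int)) from rfl, PySem.Int.band_natCast]
    simp only [Int.toNat_natCast, Nat.testBit_land, Nat.testBit_two_pow_sub_one, Int.testBit]
  · unfold PySem.Int.band
    have h1 : ¬ (0 : Int) ≤ Int.negSucc m := by simp [Int.negSucc_eq]; omega
    have h2 : (0 : Int) ≤ ((2^n - 1 : Nat) : Int) := by positivity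
    have h3 : ((-(Int.negSucc m) - 1)).toNat = m := by simp [Int.negSucc_eq]
    simp only [h1, h2, if_true, if_false, h3]
    have h4 : (((2^n - 1 : Nat) : Int)).toNat = 2^n - 1 := by
      rw [Int.toNat_natCast]
    rw [h4]
    have h5 : (2^n - 1) &&& m = m % 2^n := by rw [Nat.and_comm, Nat.and_two_pow_sub_one_eq_mod]
    rw [h5, Int.toNat_natCast, compl_sub n (m % 2^n) (Nat.mod_lt _ (Nat.two_pow_pos n)),
      Nat.testBit_xor, Nat.testBit_two_pow_sub_one]
    rw [show (m % 2^n) = m &&& (2^n - 1) from (Nat.and_two_pow_sub_one_eq_mod m n).symm,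
      Nat.testBit_land, Nat.testBit_two_pow_sub_one]
    simp only [Int.testBit]
    by_cases h : q < n <;> by_cases hm : m.testBit q <;> simp [h, hm]

theorem band_one_ite (z : Int) : PySem.Int.band z 1 = if z.testBit 0 then 1 else 0 := by
  rw [PySem.Int.band_one]
  rcases z with m | m
  · rw [PySem.Int.mod_eq_emod_of_pos (by norm_num)]
    simp [Int.testBit, Nat.testBit_eq_decide_div_mod_eq]
    by_cases h : m % 2 = 1 <;> simp [h] <;> omega
  · rw [PySem.Int.mod_eq_emod_of_pos (by norm_num)]
    simp only [Int.testBit, Nat.testBit_eq_decide_div_mod_eq, Int.negSucc_eq, pow_zero,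
      Nat.div_one]
    by_cases h : m % 2 = 1 <;> simp [h] <;> omega

theorem walk_spec (state N : Int) (n : Nat) : ∀ (d : Nat) (out : List (Int × Int)), d < 2^n →
    bftWalk state N d out = out ++ (((List.range n).reverse.filter (fun q => d.testBit q)).map
      (fun (q : Nat) => ((N - 2 - (q : Int), PySem.Int.bxor state ((3 : Int) <<< q)) : Int × Int))) := by
  induction n with
  | zero =>
    intro d out hd
    have : d = 0 := by omega
    subst this
    rw [bftWalk]
    simp
  | succ n ih =>
    intro d out hd
    by_cases hd0 : d = 0
    · subst hd0
      rw [bftWalk]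
      simp
    · have h1 : 2 ^ (PySem.Int.bitLength (d:Int) - 1) ≤ d := by
        have := PySem.Int.two_pow_bitLength_le (d : Int) (by exact_mod_cast hd0)
        simpa using this
      have h2 : d < 2 ^ (PySem.Int.bitLength (d:Int)) := by
        have := PySem.Int.lt_two_pow_bitLength (d : Int)
        simpa using this
      set q := PySem.Int.bitLength (d:Int) - 1 with hq
      have hL1 : 1 ≤ PySem.Int.bitLength (d:Int) := by
        by_contra h
        have h0 : PySem.Int.bitLength (d:Int) = 0 := by omega
        rw [h0] at h2; simp at h2; omega
      have h2' : d < 2 ^ (q + 1) := by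
        have : q + 1 = PySem.Int.bitLength (d:Int) := by omega
        rw [this]; exact h2
      have hrange : (List.range (n+1)).reverse = n :: (List.range n).reverse := by
        rw [List.range_succ, List.reverse_append]; rfl
      by_cases hbn : d.testBit n
      · -- top wall at n; q = n
        have hge : 2 ^ n ≤ d := by
          by_contra h
          rw [Nat.testBit_eq_false_of_lt (by omega)] at hbn; simp at hbn
        have hqn : q = n := by
          by_contra hne
          rcases Nat.lt_or_ge q n with h | h
          · have : (2:Nat)^(q+1) ≤ 2^n := Nat.pow_le_pow_right (by norm_num) (by omega)
            omega
          · have : (2:Nat)^(n+1) ≤ 2^q := Nat.pow_le_pow_right (by norm_num) (by omega)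
            omega
        rw [bftWalk, dif_neg hd0]
        have hshift : (1 <<< q) = 2^q := Nat.one_shiftLeft q
        have hd' : d ^^^ (1 <<< q) < 2 ^ n := by
          rw [hshift, hqn]
          apply Nat.lt_pow_two_of_testBit
          intro i hi
          rcases Nat.eq_or_lt_of_le hi with he | hgt
          · rw [← he, Nat.testBit_xor, hbn, Nat.testBit_two_pow]; simp
          · rw [Nat.testBit_xor, Nat.testBit_two_pow]
            have : d.testBit i = false := Nat.testBit_eq_false_of_lt
              (lt_of_lt_of_le h2' (Nat.pow_le_pow_right (by norm_num) (by omega)))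
            simp [this]; omega
        rw [ih _ _ hd']
        have hsame : ((List.range n).reverse.filter (fun i => (d ^^^ (1 <<< q)).testBit i))
            = (List.range n).reverse.filter (fun i => d.testBit i) := by
          apply List.filter_congr
          intro i hi
          have hi' : i < n := by
            have := List.mem_reverse.mp hi
            exact List.mem_range.mp this
          rw [hshift, hqn, Nat.testBit_xor, Nat.testBit_two_pow]
          simp [Nat.ne_of_gt hi']
        rw [hsame, hrange]
        simp only [List.filter_cons, hbn, if_pos]
        simp
        exact ⟨by rw [← hq, hqn], by rw [← hq, hqn]⟩
      · -- no wall at n: d < 2^n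
        have hlt : d < 2^n := by
          apply Nat.lt_pow_two_of_testBit
          intro i hi
          rcases Nat.eq_or_lt_of_le hi with he | hgt
          · rw [← he]; exact Bool.not_eq_true _ ▸ (by simpa using hbn)
          · exact Nat.testBit_eq_false_of_lt
              (lt_of_lt_of_le hd (Nat.pow_le_pow_right (by norm_num) (by omega)))
        rw [ih _ _ hlt, hrange]
        simp only [List.filter_cons, hbn]
        simp

theorem pyRange_nil_of_le (a b : Int) (h : b ≤ a) : PySem.List.pyRange a b = [] := by
  rw [PySem.List.pyRange_of_pos a b (by norm_num)]
  rw [if_neg (by omega)]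
  simp

theorem mask3 (q : Nat) :
    PySem.Int.bor ((1 : Int) <<< (q+1)) ((1 : Int) <<< q) = (3 : Int) <<< q := by
  have a1 : (1:Int) <<< (q+1) = ((2^(q+1) : Nat) : Int) := by rw [Int.shiftLeft_eq]; push_cast; ring
  have a2 : (1:Int) <<< q = ((2^q : Nat) : Int) := by rw [Int.shiftLeft_eq]; push_cast; ring
  have a3 : (3:Int) <<< q = ((3*2^q : Nat) : Int) := by rw [Int.shiftLeft_eq]; push_cast; ring
  rw [a1, a2, PySem.Int.bor_natCast, a3]
  congr 1
  have h := (Nat.two_pow_add_eq_or_of_lt (i := q+1) (b := 2^q)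
    (Nat.pow_lt_pow_right one_lt_two (Nat.lt_succ_self q)) 1).symm
  have h' : (2:Nat)^(q+1) ||| 2^q = 2^(q+1) + 2^q := by simpa using h
  rw [h', pow_succ]; ring

theorem main_equiv (state N : Int) : bond_flip_targets state N = bond_flip_targets_alt state N := by
  by_cases hN : N < 2
  · unfold bond_flip_targets bond_flip_targets_alt
    rw [if_pos hN, pyRange_nil_of_le 0 (N-1) (by omega)]
    rfl
  · -- N ≥ 2
    set n : Nat := (N - 1).toNat with hn
    have hNn : N = (n : Int) + 1 := by omega
    have hn1 : 1 ≤ n := by omega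
    set x : Int := PySem.Int.bxor state (state >>> 1) with hx
    set d : Nat := (PySem.Int.band x (((2^n : Nat) : Int) - 1)).toNat with hd
    -- B side
    have hB : bond_flip_targets_alt state N =
        (((List.range n).reverse.filter (fun q => d.testBit q)).map
          (fun (q : Nat) => ((N - 2 - (q : Int), PySem.Int.bxor state ((3 : Int) <<< q)) : Int × Int))) := by
      unfold bond_flip_targets_alt
      rw [if_neg (by omega)]
      show bftWalk state N ((PySem.Int.band (PySem.Int.bxor state (state >>> 1))
        ((1 : Int) <<< (N - 1).toNat - 1)).toNat) [] = _
      have hmask : ((1 : Int) <<< (N - 1).toNat) - 1 = (((2^n : Nat) : Int) - 1) := by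
        rw [← hn, Int.shiftLeft_eq]
        push_cast; ring
      rw [hmask, ← hx, ← hd]
      have hlt : d < 2^n := by
        rw [hd]
        apply Nat.lt_pow_two_of_testBit
        intro i hi
        rw [band_mask_testBit]
        have : ¬ i < n := by omega
        simp [this]
      rw [walk_spec state N n d [] hlt]
      simp
    rw [hB]
    -- A side
    have hA : bond_flip_targets state N =
        ((List.range n).filter
            (fun (b : Nat) => decide (PySem.Int.band (state >>> (n - b)) 1 ≠ PySem.Int.band (state >>> (n - 1 - b)) 1))).map
          (fun (b : Nat) => (((b : Int), PySem.Int.bxor state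
            (PySem.Int.bor ((1 : Int) <<< (n - b)) ((1 : Int) <<< (n - 1 - b)))) : Int × Int)) := by
      unfold bond_flip_targets
      have hr : N - 1 = ((n : Nat) : Int) := by omega
      rw [hr, PySem.List.pyRange_zero_natCast, List.foldl_map]
      have hfun : (fun (out : List (Int × Int)) (b : Nat) =>
            let bit_hi := PySem.Int.band (state >>> ((n : Int) - (b:Int)).toNat) 1
            let bit_lo := PySem.Int.band (state >>> (N - 2 - (b:Int)).toNat) 1
            if bit_hi ≠ bit_lo then
              let mask := PySem.Int.bor ((1 : Int) <<< ((n : Int) - (b:Int)).toNat) ((1 : Int) <<< (N - 2 - (b:Int)).toNat)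
              out ++ [((b : Int), PySem.Int.bxor state mask)]
            else out) =
          (fun (out : List (Int × Int)) (b : Nat) =>
            if (decide (PySem.Int.band (state >>> ((n : Int) - (b:Int)).toNat) 1 ≠ PySem.Int.band (state >>> (N - 2 - (b:Int)).toNat) 1)) = true then
              out ++ [((b : Int), PySem.Int.bxor state
                (PySem.Int.bor ((1 : Int) <<< ((n : Int) - (b:Int)).toNat) ((1 : Int) <<< (N - 2 - (b:Int)).toNat)))]
            else out) := by
        funext out b
        simp only [decide_eq_true_eq]
      rw [hfun, PySem.List.foldl_append_if]
      simp only [List.nil_append]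
      have hfix : ∀ b ∈ List.range n,
          ((n : Int) - (b:Int)).toNat = n - b ∧ (N - 2 - (b:Int)).toNat = n - 1 - b := by
        intro b hb
        have hblt : b < n := List.mem_range.mp hb
        constructor <;> omega
      rw [List.filter_congr (fun b hb => ?_)]
      · apply List.map_congr_left
        intro b hb
        obtain ⟨e1, e2⟩ := hfix b (List.mem_of_mem_filter hb)
        rw [e1, e2]
      · obtain ⟨e1, e2⟩ := hfix b hb
        rw [e1, e2]
    rw [hA]
    -- reindex B through q = n-1-b
    have hrev : (List.range n).reverse = (List.range n).map (fun b => n - 1 - b) := by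
      rw [List.range_eq_range', List.reverse_range']
      simp [← List.range_eq_range']
    rw [hrev, List.filter_map, List.map_map]
    -- the wall test at q = n-1-b is exactly A's differing-bits test at bond b
    have hbit : ∀ b ∈ List.range n,
        ((fun q => d.testBit q) ∘ (fun b => n - 1 - b)) b
          = decide (PySem.Int.band (state >>> (n - b)) 1 ≠ PySem.Int.band (state >>> (n - 1 - b)) 1) := by
      intro b hb
      have hblt : b < n := List.mem_range.mp hb
      simp only [Function.comp_apply]
      set q : Nat := n - 1 - b with hqdef
      have hq1 : n - b = q + 1 := by omega
      rw [hd, band_mask_testBit, hx, bxor_eq_xor, Int.testBit_lxor, itb_shiftRight_one]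
      rw [hq1, band_one_ite, band_one_ite, itb_shiftRight, itb_shiftRight]
      simp only [Nat.add_zero]
      have hqn : q < n := by omega
      by_cases h1 : state.testBit (q+1) <;> by_cases h2 : state.testBit q <;>
        simp [h1, h2, hqn, Nat.add_comm 1 q]
    rw [List.filter_congr hbit]
    apply List.map_congr_left
    intro b hb
    have hblt : b < n := List.mem_range.mp (List.mem_of_mem_filter hb)
    have hq1 : n - b = (n - 1 - b) + 1 := by omega
    have hfst : N - 2 - ((n - 1 - b : Nat) : Int) = (b : Int) := by omega
    simp only [Function.comp_apply]
    rw [hq1, mask3, hfst]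

-- ===== VERDICT (by name: the statement is the Claim_ definition above) =====
theorem bond_flip_targets_spec : Claim_equal_bond_flip_targets := by
  intro state N _
  exact main_equiv state N
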